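-- pv_equiv track=rewrite | github.com/rybnikov/HA_SQUID_PROXY | squid_proxy_manager/rootfs/app/ovpn_patcher.py | patch_ovpn_for_squid
-- ===== SOURCE A (Python) =====
-- from typing import Optional, Tuple
--
-- def patch_ovpn_for_squid(
--     content: str,
--     proxy_host: str,
--     proxy_port: int,
--     username: Optional[str] = None,
--     password: Optional[str] = None
-- ) -> str:
--     """Patch .ovpn config to route through Squid HTTP proxy.
--
--     Adds http-proxy directive and inline auth if credentials provided.
--     """
--     lines = content.split('\n')
--     result = []
--     http_proxy_added = False
--
--     for line in lines:
--         # Remove existing http-proxy directives to avoid conflicts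
--         if line.strip().startswith('http-proxy'):
--             continue
--         result.append(line)
--
--     # Add http-proxy directive after client directive
--     for i, line in enumerate(result):
--         if line.strip().startswith('client'):
--             result.insert(i + 1, f"http-proxy {proxy_host} {proxy_port}")
--             http_proxy_added = True
--
--             # Add inline auth if provided
--             if username and password:
--                 result.insert(i + 2, "<http-proxy-user-pass>")
--                 result.insert(i + 3, username)
--                 result.insert(i + 4, password)
--                 result.insert(i + 5, "</http-proxy-user-pass>")
--             break
--
--     # If no 'client' directive found, add at beginning
--     if not http_proxy_added:
--         proxy_line = f"http-proxy {proxy_host} {proxy_port}"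
--         if username and password:
--             result.insert(0, "</http-proxy-user-pass>")
--             result.insert(0, password)
--             result.insert(0, username)
--             result.insert(0, "<http-proxy-user-pass>")
--         result.insert(0, proxy_line)
--
--     return '\n'.join(result)
-- ===== SOURCE B (Python) =====
-- from typing import Optional
--
-- def patch_ovpn_for_squid(
--     content: str,
--     proxy_host: str,
--     proxy_port: int,
--     username: Optional[str] = None,
--     password: Optional[str] = None
-- ) -> str:
--     """Patch .ovpn config to route through Squid HTTP proxy (single pass)."""
--     block = [f"http-proxy {proxy_host} {proxy_port}"]
--     if username and password:
--         block += ["<http-proxy-user-pass>", username, password, "</http-proxy-user-pass>"]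
--     out = []
--     inserted = False
--     for line in content.split('\n'):
--         stripped = line.strip()
--         if stripped.startswith('http-proxy'):
--             continue
--         out.append(line)
--         if not inserted and stripped.startswith('client'):
--             out.extend(block)
--             inserted = True
--     if not inserted:
--         out = block + out
--     return '\n'.join(out)
-- ===== Notes on version B (the rewrite author's own statement) =====
-- stated objective: simpler
-- what changed: Builds the proxy/auth insertion block up front and splices it in during a single construction pass over the lines, replacing A's two sequential passes (a filter pass, then an enumerate scan with a chain of indexed list.insert calls and a separate prepend branch).
import Mathlib
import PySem

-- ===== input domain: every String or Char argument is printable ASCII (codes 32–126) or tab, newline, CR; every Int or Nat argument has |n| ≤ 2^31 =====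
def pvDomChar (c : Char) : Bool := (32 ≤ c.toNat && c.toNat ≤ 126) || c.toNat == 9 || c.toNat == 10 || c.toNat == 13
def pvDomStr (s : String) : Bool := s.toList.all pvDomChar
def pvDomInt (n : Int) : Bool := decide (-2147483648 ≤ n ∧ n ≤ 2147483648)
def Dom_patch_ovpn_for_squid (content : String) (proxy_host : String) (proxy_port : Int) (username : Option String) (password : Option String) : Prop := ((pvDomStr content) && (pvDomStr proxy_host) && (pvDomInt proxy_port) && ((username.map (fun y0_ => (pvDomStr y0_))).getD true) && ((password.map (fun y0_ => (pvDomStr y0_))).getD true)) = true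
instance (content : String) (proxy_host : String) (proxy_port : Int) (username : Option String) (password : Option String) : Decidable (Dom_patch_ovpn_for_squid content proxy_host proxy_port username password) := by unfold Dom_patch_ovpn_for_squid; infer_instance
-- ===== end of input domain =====

-- B replaces A's two sequential passes (filter, then enumerate + indexed `list.insert` chain)
-- by building the insertion block up front and splicing it in during one single construction
-- pass; objective: simpler (one pass, no index arithmetic). Same return value everywhere.

-- shared helpers: Python truthiness of an Optional[str], and the two line predicates
def pvTruthy (o : Option String) : Bool :=
  match o with
  | none => false
  | some s => !(s == "")

def pvIsHttpProxy (l : String) : Bool := PySem.Str.startswith (PySem.Str.strip l) "http-proxy"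

def pvIsClient (l : String) : Bool := PySem.Str.startswith (PySem.Str.strip l) "client"

-- ===== PORT A =====
-- `for i, line in enumerate(result): if …client…: …; break` — first matching index
def pvFindClient : List String → Option Nat
  | [] => none
  | l :: rest => if pvIsClient l then some 0 else (pvFindClient rest).map (· + 1)

def patch_ovpn_for_squid (content : String) (proxy_host : String) (proxy_port : Int) (username : Option String) (password : Option String) : String :=
  -- content.split('\n'); the separator is non-empty so split? is always `some`
  let lines := (PySem.Str.split? content "\n").getD []
  let result := lines.filter (fun l => !(pvIsHttpProxy l))
  match pvFindClient result with
  | some i =>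
      let r1 := PySem.List.insert result ((i : Int) + 1) ("http-proxy " ++ proxy_host ++ " " ++ PySem.Int.toStr proxy_port)
      let r5 :=
        if pvTruthy username && pvTruthy password then
          let r2 := PySem.List.insert r1 ((i : Int) + 2) "<http-proxy-user-pass>"
          let r3 := PySem.List.insert r2 ((i : Int) + 3) (username.getD "")
          let r4 := PySem.List.insert r3 ((i : Int) + 4) (password.getD "")
          PySem.List.insert r4 ((i : Int) + 5) "</http-proxy-user-pass>"
        else r1
      PySem.Str.join "\n" r5
  | none =>
      let proxy_line := "http-proxy " ++ proxy_host ++ " " ++ PySem.Int.toStr proxy_port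
      let r :=
        if pvTruthy username && pvTruthy password then
          PySem.List.insert (PySem.List.insert (PySem.List.insert (PySem.List.insert result 0 "</http-proxy-user-pass>") 0 (password.getD "")) 0 (username.getD "")) 0 "<http-proxy-user-pass>"
        else result
      PySem.Str.join "\n" (PySem.List.insert r 0 proxy_line)

-- ===== PORT B =====
-- the single construction pass of Source B: skip http-proxy lines, append each other line,
-- and right after the first `client` line splice in the block; returns (out, inserted)
def pvGoB (block : List String) : List String → Bool → (List String × Bool)
  | [], inserted => ([], inserted)
  | l :: rest, inserted =>
      if pvIsHttpProxy l then pvGoB block rest inserted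
      else if !inserted && pvIsClient l then
        let (r, f) := pvGoB block rest true
        (l :: (block ++ r), f)
      else
        let (r, f) := pvGoB block rest inserted
        (l :: r, f)

def patch_ovpn_for_squid_alt (content : String) (proxy_host : String) (proxy_port : Int) (username : Option String) (password : Option String) : String :=
  let block := ["http-proxy " ++ proxy_host ++ " " ++ PySem.Int.toStr proxy_port] ++
    (if pvTruthy username && pvTruthy password then
      ["<http-proxy-user-pass>", username.getD "", password.getD "", "</http-proxy-user-pass>"]
    else [])
  let lines := (PySem.Str.split? content "\n").getD []
  let (out, inserted) := pvGoB block lines false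
  PySem.Str.join "\n" (if inserted then out else block ++ out)

-- ===== PRECONDITION & SPEC =====
def Spec_patch_ovpn_for_squid (content : String) (proxy_host : String) (proxy_port : Int) (username : Option String) (password : Option String) (out : String) : Prop := out = patch_ovpn_for_squid_alt content proxy_host proxy_port username password
instance (content : String) (proxy_host : String) (proxy_port : Int) (username : Option String) (password : Option String) (out : String) : Decidable (Spec_patch_ovpn_for_squid content proxy_host proxy_port username password out) := by unfold Spec_patch_ovpn_for_squid; infer_instance

-- ===== CLAIM (what is proved, stated in full; the proofs are below) =====
def Claim_equal_patch_ovpn_for_squid : Prop := ∀ (content : String) (proxy_host : String) (proxy_port : Int) (username : Option String) (password : Option String), Dom_patch_ovpn_for_squid content proxy_host proxy_port username password → Spec_patch_ovpn_for_squid content proxy_host proxy_port username password (patch_ovpn_for_squid content proxy_host proxy_port username password)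

-- ===== LEMMAS AND PROOFS =====

-- the effect of A's second pass on the filtered list, expressed structurally
def pvIns1 (block : List String) : List String → (List String × Bool)
  | [] => ([], false)
  | l :: rest =>
      if pvIsClient l then (l :: (block ++ rest), true)
      else
        let (r, f) := pvIns1 block rest
        (l :: r, f)

-- a chain of inserts at consecutive positions
def pvInsAll (fs : List String) (n : Int) : List String → List String
  | [] => fs
  | b :: bs => pvInsAll (PySem.List.insert fs n b) (n + 1) bs

theorem pvInsert_nonneg (xs : List String) (i : Int) (v : String) (h : 0 ≤ i) :
    PySem.List.insert xs i v = xs.take i.toNat ++ v :: xs.drop i.toNat := by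
  rcases le_total i (xs.length : Int) with hle | hle
  · have : (min i (xs.length : Int)).toNat = i.toNat := by omega
    simp [PySem.List.insert, PySem.List.sliceIndices, h.not_gt, this]
  · have h1 : (min i (xs.length : Int)).toNat = xs.length := by omega
    have h2 : xs.length ≤ i.toNat := by omega
    simp [PySem.List.insert, PySem.List.sliceIndices, h.not_gt, h1,
      List.take_of_length_le h2, List.drop_of_length_le h2,
      List.take_of_length_le (le_refl xs.length), List.drop_of_length_le (le_refl xs.length)]

theorem pvInsert_cons (l : String) (xs : List String) (n : Int) (hn : 0 ≤ n) (v : String) :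
    PySem.List.insert (l :: xs) (n + 1) v = l :: PySem.List.insert xs n v := by
  rw [pvInsert_nonneg _ _ _ (by omega), pvInsert_nonneg _ _ _ hn]
  have : (n + 1).toNat = n.toNat + 1 := by omega
  simp [this]

theorem pvInsAll_cons (bs : List String) : ∀ (l : String) (xs : List String) (n : Int), 0 ≤ n →
    pvInsAll (l :: xs) (n + 1) bs = l :: pvInsAll xs n bs := by
  induction bs with
  | nil => intro l xs n hn; simp [pvInsAll]
  | cons b bs ih =>
      intro l xs n hn
      simp only [pvInsAll]
      rw [pvInsert_cons l xs n hn b, ih l (PySem.List.insert xs n b) (n + 1) (by omega)]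

theorem pvInsAll_zero (bs : List String) : ∀ xs, pvInsAll xs 0 bs = bs ++ xs := by
  induction bs with
  | nil => intro xs; simp [pvInsAll]
  | cons b bs ih =>
      intro xs
      simp only [pvInsAll, PySem.List.insert_zero]
      rw [show (0 : Int) + 1 = 0 + 1 by ring, pvInsAll_cons bs b xs 0 le_rfl, ih]
      simp

theorem pvIns1_none (block : List String) : ∀ fs, pvFindClient fs = none →
    pvIns1 block fs = (fs, false) := by
  intro fs
  induction fs with
  | nil => intro _; simp [pvIns1]
  | cons l rest ih =>
      intro h
      simp only [pvFindClient] at h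
      by_cases hc : pvIsClient l
      · simp [hc] at h
      · simp [hc, Option.map_eq_none_iff] at h
        simp [pvIns1, hc, ih h]

theorem pvIns1_some (block : List String) : ∀ fs i, pvFindClient fs = some i →
    pvInsAll fs ((i : Int) + 1) block = (pvIns1 block fs).1 ∧ (pvIns1 block fs).2 = true := by
  intro fs
  induction fs with
  | nil => intro i h; simp [pvFindClient] at h
  | cons l rest ih =>
      intro i h
      simp only [pvFindClient] at h
      by_cases hc : pvIsClient l
      · simp [hc] at h
        subst h
        constructor
        · rw [show ((0 : Nat) : Int) + 1 = 0 + 1 by norm_num,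
            pvInsAll_cons block l rest 0 le_rfl, pvInsAll_zero]
          simp [pvIns1, hc]
        · simp [pvIns1, hc]
      · simp only [hc] at h
        obtain ⟨j, hj, rfl⟩ := Option.map_eq_some_iff.mp h
        obtain ⟨h1, h2⟩ := ih j hj
        constructor
        · rw [show ((j + 1 : Nat) : Int) + 1 = ((j : Int) + 1) + 1 by push_cast; ring,
            pvInsAll_cons block l rest _ (by positivity), h1]
          simp [pvIns1, hc]
        · simp [pvIns1, hc, h2]

theorem pvGoB_true (block : List String) : ∀ xs,
    pvGoB block xs true = (xs.filter (fun l => !(pvIsHttpProxy l)), true) := by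
  intro xs
  induction xs with
  | nil => simp [pvGoB]
  | cons l rest ih =>
      by_cases hp : pvIsHttpProxy l
      · simp [pvGoB, hp, ih, List.filter]
      · simp [pvGoB, hp, ih, List.filter]

theorem pvGoB_false (block : List String) : ∀ xs,
    pvGoB block xs false = pvIns1 block (xs.filter (fun l => !(pvIsHttpProxy l))) := by
  intro xs
  induction xs with
  | nil => simp [pvGoB, pvIns1]
  | cons l rest ih =>
      by_cases hp : pvIsHttpProxy l
      · simp [pvGoB, hp, ih, List.filter]
      · by_cases hc : pvIsClient l
        · simp [pvGoB, hp, hc, List.filter, pvIns1, pvGoB_true]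
        · simp [pvGoB, hp, hc, List.filter, pvIns1, ih]

-- ===== VERDICT (by name: the statement is the Claim_ definition above) =====
theorem patch_ovpn_for_squid_spec : Claim_equal_patch_ovpn_for_squid := by
  intro content proxy_host proxy_port username password _
  unfold Spec_patch_ovpn_for_squid patch_ovpn_for_squid patch_ovpn_for_squid_alt
  by_cases ht : pvTruthy username && pvTruthy password <;>
    simp only [ht, if_true, if_false, Bool.false_eq_true, List.cons_append, List.nil_append,
      List.append_nil] <;>
  rw [pvGoB_false] <;>
  generalize "http-proxy " ++ proxy_host ++ " " ++ PySem.Int.toStr proxy_port = p <;>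
  generalize username.getD "" = u <;>
  generalize password.getD "" = pw <;>
  generalize ((PySem.Str.split? content "\n").getD []).filter (fun l => !(pvIsHttpProxy l)) = F
  · rcases h : pvFindClient F with _ | i
    · rw [pvIns1_none _ F h]
      simp [PySem.List.insert_zero]
    · obtain ⟨h1, h2⟩ := pvIns1_some [p, "<http-proxy-user-pass>", u, pw, "</http-proxy-user-pass>"] F i h
      simp only [h2, if_true]
      rw [← h1]
      simp [pvInsAll,
        show ((i : Int) + 1) + 1 = (i : Int) + 2 from by ring,
        show ((i : Int) + 2) + 1 = (i : Int) + 3 from by ring,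
        show ((i : Int) + 3) + 1 = (i : Int) + 4 from by ring,
        show ((i : Int) + 4) + 1 = (i : Int) + 5 from by ring]
  · rcases h : pvFindClient F with _ | i
    · rw [pvIns1_none _ F h]
      simp [PySem.List.insert_zero]
    · obtain ⟨h1, h2⟩ := pvIns1_some [p] F i h
      simp only [h2, if_true]
      rw [← h1]
      simp [pvInsAll]
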